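-- pv_equiv track=rewrite | github.com/wanzhouyi/leetcode | 1.数组和字符串/分治/395. 至少有 K 个重复字符的最长子串.py | getMaxKcharLen
-- ===== SOURCE A (Python) =====
-- def getMaxKcharLen(s, k, num):
--     """
--     s: 源串
--     k: 次数
--     num:包含num个字母
--     """
--
--     memo = {}
--     cnt = 0
--     max_len = 0
--     left, right = 0, 0
--     n = len(s)
--     while right < n:
--         c = s[right]
--         memo[c] = memo.get(c, 0) + 1
--         if memo[c] == k:
--             cnt += 1
--
--         if len(memo) == num and cnt == num:
--             max_len = max(max_len, right - left + 1)
--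
--         # 缩小窗口
--         while left < right and len(memo) > num:
--             c = s[left]
--             if memo[c] == k:
--                 cnt -= 1
--             memo[c] -= 1
--
--             if memo[c] == 0:
--                 del memo[c]
--             left += 1
--         right += 1
--     return max_len
-- ===== SOURCE B (Python) =====
-- def getMaxKcharLen(s, k, num):
--     # Brute force over all substrings: grow each window to the right,
--     # keeping a frequency dict, and record lengths where the window has
--     # exactly num distinct chars, each occurring at least k times.
--     n = len(s)
--     best = 0
--     for i in range(n):
--         counts = {}
--         for j, c in enumerate(s[i:], i):
--             counts[c] = counts.get(c, 0) + 1
--             if len(counts) == num and all(v >= k for v in counts.values()):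
--                 best = max(best, j - i + 1)
--     return best
-- ===== Notes on version B (the rewrite author's own statement) =====
-- stated objective: alternative
-- what changed: Replaced the single-pass sliding window (lazy shrink with a live >=k counter) by an exhaustive two-level scan over all substrings, each start growing its own frequency dict and testing the condition directly.
-- intended difference: For k <= 0 with 1 <= num <= #distinct(s), A's 'memo[c]==k' trigger can never fire so A always returns 0, while B returns the length of the longest substring with exactly num distinct chars (each trivially occurring >= k times), which is what the spec 'at least k repeats' means for k <= 0. — e.g. on getMaxKcharLen("a", 0, 1): A returns 0, B returns 1
import Mathlib
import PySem

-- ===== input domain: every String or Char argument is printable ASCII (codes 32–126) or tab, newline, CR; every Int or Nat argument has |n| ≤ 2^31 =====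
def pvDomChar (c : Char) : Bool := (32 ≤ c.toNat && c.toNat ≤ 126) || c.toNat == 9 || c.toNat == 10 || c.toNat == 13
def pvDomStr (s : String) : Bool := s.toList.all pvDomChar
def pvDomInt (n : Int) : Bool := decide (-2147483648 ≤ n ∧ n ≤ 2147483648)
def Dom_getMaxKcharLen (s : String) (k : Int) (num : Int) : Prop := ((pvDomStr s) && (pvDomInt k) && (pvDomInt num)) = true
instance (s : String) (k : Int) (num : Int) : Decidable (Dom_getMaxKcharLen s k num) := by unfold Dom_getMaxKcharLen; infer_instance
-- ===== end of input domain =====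

-- B replaces A's sliding window by an exhaustive scan of all substrings (alternative algorithm, not faster);
-- for k ≤ 0 (where A's ==k trigger can never fire) B returns the intended value, stated below as D_.

-- ===== PORT A =====
-- inner 'while left < right and len(memo) > num' loop of A (fuel = right - left bounds the iterations)
def aShrink (l : List Char) (k num : Int) : Nat → PySem.Dict Char Int → Int → Nat → Nat →
    PySem.Dict Char Int × Int × Nat
  | 0, memo, cnt, left, _ => (memo, cnt, left)
  | fuel + 1, memo, cnt, left, right =>
    if left < right ∧ num < (memo.size : Int) then
      let c := l.getD left ' '
      let cnt' := if memo.getD c 0 = k then cnt - 1 else cnt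
      let memo' := memo.insert c (memo.getD c 0 - 1)
      let memo'' := if memo'.getD c 0 = 0 then memo'.erase c else memo'
      aShrink l k num fuel memo'' cnt' (left + 1) right
    else (memo, cnt, left)

-- outer 'while right < n' loop of A (fuel = len(s) - right bounds the iterations)
def aLoop (l : List Char) (k num : Int) : Nat → PySem.Dict Char Int → Int → Int → Nat → Nat → Int
  | 0, _, _, maxLen, _, _ => maxLen
  | fuel + 1, memo, cnt, maxLen, left, right =>
    if right < l.length then
      let c := l.getD right ' '
      let memo1 := memo.insert c (memo.getD c 0 + 1)
      let cnt1 := if memo1.getD c 0 = k then cnt + 1 else cnt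
      let maxLen1 := if (memo1.size : Int) = num ∧ cnt1 = num then
          max maxLen ((right : Int) - (left : Int) + 1) else maxLen
      let r := aShrink l k num (right - left) memo1 cnt1 left right
      aLoop l k num fuel r.1 r.2.1 maxLen1 r.2.2 (right + 1)
    else maxLen

def getMaxKcharLen (s : String) (k : Int) (num : Int) : Int :=
  aLoop s.toList k num s.toList.length PySem.Dict.empty 0 0 0 0

-- ===== PORT B =====
-- one step of B's inner loop: extend the window by (j, c), update the dict, test the condition
def bStep (k num : Int) (i : Int) (st : PySem.Dict Char Int × Int) (p : Int × Char) :
    PySem.Dict Char Int × Int :=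
  let counts := st.1.insert p.2 (st.1.getD p.2 0 + 1)
  let best := if (counts.size : Int) = num ∧ counts.values.all (fun v => k ≤ v) = true then
      max st.2 (p.1 - i + 1) else st.2
  (counts, best)

def getMaxKcharLen_alt (s : String) (k : Int) (num : Int) : Int :=
  let l := s.toList
  (PySem.List.pyRange 0 (l.length : Int) 1).foldl
    (fun best i =>
      ((PySem.List.enumerate (PySem.List.slice l (some i) none) i).foldl
        (bStep k num i) (PySem.Dict.empty, best)).2) 0

-- ===== PRECONDITION & SPEC =====
-- For k ≤ 0 with 1 ≤ num ≤ #distinct(s), A's 'memo[c]==k' trigger can never fire so A returns 0,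
-- while B returns the length of the longest substring with exactly num distinct characters (each
-- trivially occurring ≥ k times), which is what 'at least k repetitions' means for k ≤ 0.
def D_getMaxKcharLen (s : String) (k : Int) (num : Int) : Prop :=
  k ≤ 0 ∧ 1 ≤ num ∧ num ≤ ((PySem.Set.ofList s.toList).length : Int)
instance (s : String) (k : Int) (num : Int) : Decidable (D_getMaxKcharLen s k num) := by
  unfold D_getMaxKcharLen; infer_instance

def Spec_getMaxKcharLen (s : String) (k : Int) (num : Int) (out : Int) : Prop :=
  ¬ D_getMaxKcharLen s k num → out = getMaxKcharLen_alt s k num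
instance (s : String) (k : Int) (num : Int) (out : Int) : Decidable (Spec_getMaxKcharLen s k num out) := by
  unfold Spec_getMaxKcharLen; infer_instance

def pvDiffWitness_getMaxKcharLen : String × Int × Int := ("a", 0, 1)
def pvDiffWitnessOut_getMaxKcharLen : Int × Int := (0, 1)

-- ===== CLAIM (what is proved, stated in full; the proofs are below) =====
def Claim_unchanged_getMaxKcharLen : Prop := ∀ (s : String) (k : Int) (num : Int), Dom_getMaxKcharLen s k num → Spec_getMaxKcharLen s k num (getMaxKcharLen s k num)
def Claim_changed_getMaxKcharLen : Prop := Dom_getMaxKcharLen (pvDiffWitness_getMaxKcharLen.1) (pvDiffWitness_getMaxKcharLen.2.1) (pvDiffWitness_getMaxKcharLen.2.2) ∧ D_getMaxKcharLen (pvDiffWitness_getMaxKcharLen.1) (pvDiffWitness_getMaxKcharLen.2.1) (pvDiffWitness_getMaxKcharLen.2.2) ∧ getMaxKcharLen (pvDiffWitness_getMaxKcharLen.1) (pvDiffWitness_getMaxKcharLen.2.1) (pvDiffWitness_getMaxKcharLen.2.2) = pvDiffWitnessOut_getMaxKcharLen.1 ∧ getMaxKcharLen_alt (pvDiffWitness_getMaxKcharLen.1)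 (pvDiffWitness_getMaxKcharLen.2.1) (pvDiffWitness_getMaxKcharLen.2.2) = pvDiffWitnessOut_getMaxKcharLen.2 ∧ pvDiffWitnessOut_getMaxKcharLen.1 ≠ pvDiffWitnessOut_getMaxKcharLen.2
def Claim_exact_getMaxKcharLen : Prop := ∀ (s : String) (k : Int) (num : Int), Dom_getMaxKcharLen s k num → D_getMaxKcharLen s k num → getMaxKcharLen s k num ≠ getMaxKcharLen_alt s k num

-- ===== LEMMAS AND PROOFS =====

-- ---- abstractions used by the proofs ----

-- the half-open window s[i:r]
def win (l : List Char) (i r : Nat) : List Char := (l.drop i).take (r - i)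
-- number of distinct characters
def dst (t : List Char) : Nat := t.toFinset.card
-- number of distinct characters occurring at least k times
def kcnt (k : Int) (t : List Char) : Nat :=
  (t.toFinset.filter (fun c => k ≤ (t.count c : Int))).card
-- s[i:r] is a qualifying substring: exactly num distinct chars, each at least k times
def Valid (l : List Char) (k num : Int) (i r : Nat) : Prop :=
  i < r ∧ r ≤ l.length ∧ (dst (win l i r) : Int) = num ∧
    ∀ c ∈ win l i r, k ≤ ((win l i r).count c : Int)

-- ---- window lemmas ----
theorem win_zero (l : List Char) (i : Nat) : win l i i = [] := by
  simp [win]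

theorem win_eq_nil (l : List Char) {i r : Nat} (h : r ≤ i) : win l i r = [] := by
  simp [win, Nat.sub_eq_zero_of_le h]

theorem win_length (l : List Char) {i r : Nat} (hr : r ≤ l.length) (hir : i ≤ r) :
    (win l i r).length = r - i := by
  simp [win]; omega

theorem win_succ (l : List Char) {i r : Nat} (hir : i ≤ r) (hr : r < l.length) :
    win l i (r + 1) = win l i r ++ [l.getD r ' '] := by
  unfold win
  have h1 : r + 1 - i = (r - i) + 1 := by omega
  rw [h1, List.take_add_one, List.getElem?_drop]
  have h2 : i + (r - i) = r := by omega
  rw [h2, List.getElem?_eq_getElem hr]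
  simp [List.getD, List.getElem?_eq_getElem hr]

theorem win_split (l : List Char) {i m r : Nat} (him : i ≤ m) (hmr : m ≤ r) :
    win l i r = win l i m ++ win l m r := by
  unfold win
  have h1 : r - i = (m - i) + (r - m) := by omega
  rw [h1, List.take_add, List.drop_drop]
  have h2 : i + (m - i) = m := by omega
  rw [h2]

theorem win_cons (l : List Char) {i r : Nat} (hir : i < r) (hr : r ≤ l.length) :
    win l i r = l.getD i ' ' :: win l (i + 1) r := by
  unfold win
  have hi : i < l.length := by omega
  rw [List.drop_eq_getElem_cons hi]
  have h1 : r - i = (r - (i + 1)) + 1 := by omega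
  rw [h1, List.take_cons (by omega)]
  simp [List.getD, List.getElem?_eq_getElem hi]

theorem win_zero_length (l : List Char) : win l 0 l.length = l := by
  simp [win]

theorem win_subset_l (l : List Char) (i r : Nat) : ∀ c ∈ win l i r, c ∈ l := by
  intro c hc
  exact List.mem_of_mem_drop (List.mem_of_mem_take hc)

-- ---- dst / kcnt lemmas ----
theorem dst_nil : dst [] = 0 := by simp [dst]

theorem dst_pos_of_ne_nil {t : List Char} (h : t ≠ []) : 1 ≤ dst t := by
  obtain ⟨c, t, rfl⟩ := List.exists_cons_of_ne_nil h
  have : c ∈ (c :: t).toFinset := by simp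
  exact Finset.card_pos.mpr ⟨c, this⟩

theorem dst_le_of_subset {t u : List Char} (h : ∀ x ∈ t, x ∈ u) : dst t ≤ dst u := by
  apply Finset.card_le_card
  intro x hx
  rw [List.mem_toFinset] at *
  exact h x hx

theorem subset_of_dst_le {t u : List Char} (h : ∀ x ∈ t, x ∈ u) (hd : dst u ≤ dst t) :
    ∀ x ∈ u, x ∈ t := by
  have hsub : t.toFinset ⊆ u.toFinset := by
    intro x hx; rw [List.mem_toFinset] at *; exact h x hx
  have heq := Finset.eq_of_subset_of_card_le hsub hd
  intro x hx
  have hx2 : x ∈ u.toFinset := by simpa using hx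
  rw [← heq] at hx2
  simpa using hx2

theorem dst_append_singleton (t : List Char) (c : Char) :
    dst (t ++ [c]) = if c ∈ t then dst t else dst t + 1 := by
  unfold dst
  have h1 : (t ++ [c]).toFinset = insert c t.toFinset := by
    ext x; simp
  rw [h1]
  split_ifs with h
  · rw [Finset.insert_eq_self.mpr (by simpa using h)]
  · rw [Finset.card_insert_of_notMem (by simpa using h)]

theorem kcnt_eq_dst_iff (k : Int) (t : List Char) :
    kcnt k t = dst t ↔ ∀ c ∈ t, k ≤ (t.count c : Int) := by
  unfold kcnt dst
  constructor
  · intro h c hc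
    have hfe := Finset.eq_of_subset_of_card_le (Finset.filter_subset _ _) (le_of_eq h.symm)
    have hcm : c ∈ t.toFinset.filter (fun c => k ≤ (t.count c : Int)) := by
      rw [hfe]; simpa using hc
    exact (Finset.mem_filter.mp hcm).2
  · intro h
    rw [Finset.filter_eq_self.mpr (fun x hx => h x (by simpa using hx))]

theorem kcnt_cons {k : Int} (hk : 1 ≤ k) (t : List Char) (c : Char) :
    (kcnt k (c :: t) : Int) = kcnt k t + (if (t.count c : Int) + 1 = k then 1 else 0) := by
  have key : kcnt k (c :: t) = kcnt k t + (if (t.count c : Int) + 1 = k then 1 else 0) := by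
    unfold kcnt
    rw [List.toFinset_cons, Finset.card_filter, Finset.card_filter]
    rw [← Finset.add_sum_erase _ _ (Finset.mem_insert_self c t.toFinset)]
    rw [Finset.erase_insert_eq_erase]
    have hagree : ∀ x ∈ t.toFinset.erase c,
        (if k ≤ ((c :: t).count x : Int) then 1 else 0) =
          (if k ≤ (t.count x : Int) then 1 else 0) := by
      intro x hx
      have hxc : x ≠ c := (Finset.mem_erase.mp hx).1
      have hcnt : (c :: t).count x = t.count x := by
        simp [(Ne.symm hxc)]
      rw [hcnt]
    rw [Finset.sum_congr rfl hagree]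
    have hself : (c :: t).count c = t.count c + 1 := by simp
    by_cases hc : c ∈ t
    · rw [← Finset.add_sum_erase _ (fun x => if k ≤ (t.count x : Int) then 1 else 0)
        (show c ∈ t.toFinset by simpa using hc)]
      have hpos : 1 ≤ t.count c := List.count_pos_iff.mpr hc
      rw [hself]
      split_ifs <;> omega
    · have herase : t.toFinset.erase c = t.toFinset := by
        apply Finset.erase_eq_self.mpr; simpa using hc
      have hzero : t.count c = 0 := by
        exact List.count_eq_zero.mpr hc
      rw [herase, hself, hzero]
      split_ifs <;> omega
  rw [key]
  split_ifs <;> push_cast <;> ring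

theorem kcnt_append_singleton {k : Int} (hk : 1 ≤ k) (t : List Char) (c : Char) :
    (kcnt k (t ++ [c]) : Int) = kcnt k t + (if (t.count c : Int) + 1 = k then 1 else 0) := by
  have hkc : kcnt k (t ++ [c]) = kcnt k (c :: t) := by
    unfold kcnt
    have hfin : (t ++ [c]).toFinset = (c :: t).toFinset := by
      ext x; simp
    have hcnt : ∀ x, (t ++ [c]).count x = (c :: t).count x := by
      intro x
      by_cases hxc : c = x
      · simp [hxc]
      · simp [hxc]
    rw [hfin]
    congr 1
    apply Finset.filter_congr
    intro x _
    simp [hcnt x]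
  rw [hkc, kcnt_cons hk]

theorem setOfList_length (t : List Char) : (PySem.Set.ofList t).length = dst t := by
  rw [← List.toFinset_card_of_nodup (PySem.Set.nodup_ofList (xs := t))]
  unfold dst
  congr 1
  ext x
  simp [PySem.Set.mem_ofList]

-- ---- Dict lemmas (erase; none exist in the prelude) ----
theorem dict_get?_erase (d : PySem.Dict Char Int) (c x : Char) :
    (d.erase c).get? x = if x = c then none else d.get? x := by
  obtain ⟨items⟩ := d
  simp only [PySem.Dict.erase, PySem.Dict.get?]
  induction items with
  | nil => simp
  | cons p rest ih =>
    rcases p with ⟨a, b⟩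
    by_cases hac : a = c <;> by_cases hax : a = x <;>
      simp_all [beq_iff_eq]

theorem dict_keys_erase (d : PySem.Dict Char Int) (c : Char) :
    (d.erase c).keys = d.keys.filter (fun x => !(x == c)) := by
  obtain ⟨items⟩ := d
  simp only [PySem.Dict.erase, PySem.Dict.keys]
  induction items with
  | nil => simp
  | cons p rest ih =>
    by_cases hac : p.1 = c <;> simp_all

theorem dict_getD_erase (d : PySem.Dict Char Int) (c x : Char) :
    (d.erase c).getD x 0 = if x = c then 0 else d.getD x 0 := by
  rw [PySem.Dict.getD_eq_get?_getD, dict_get?_erase]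
  split_ifs with h
  · rfl
  · rw [PySem.Dict.getD_eq_get?_getD]

theorem dict_contains_erase (d : PySem.Dict Char Int) (c x : Char) :
    (d.erase c).contains x = true ↔ (x ≠ c ∧ d.contains x = true) := by
  rw [PySem.Dict.contains_iff_mem_keys, dict_keys_erase, List.mem_filter]
  rw [PySem.Dict.contains_iff_mem_keys]
  simp [and_comm]

theorem dict_nodup_keys_erase (d : PySem.Dict Char Int) (c : Char) (h : d.keys.Nodup) :
    (d.erase c).keys.Nodup := by
  rw [dict_keys_erase]
  exact h.filter _

-- memo whose keys are exactly the members of t, with no duplicates, has size dst t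
theorem dict_size_eq_dst (d : PySem.Dict Char Int) (t : List Char)
    (hnd : d.keys.Nodup) (hmem : ∀ c, d.contains c = true ↔ c ∈ t) :
    d.size = dst t := by
  have h1 : d.size = d.keys.length := by
    simp [PySem.Dict.size, PySem.Dict.keys]
  rw [h1, ← List.toFinset_card_of_nodup hnd]
  unfold dst
  congr 1
  ext x
  simp only [List.mem_toFinset]
  rw [← PySem.Dict.contains_iff_mem_keys, hmem]

-- ---- the combined cnt invariant of A (covers both signs of k) ----
def ACnt (k : Int) (cnt : Int) (t : List Char) : Prop :=
  (1 ≤ k → cnt = (kcnt k t : Int)) ∧ (k ≤ 0 → cnt = 0)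

-- the full memo/cnt invariant of A relative to the current window t
def AInv (memo : PySem.Dict Char Int) (cnt k : Int) (t : List Char) : Prop :=
  memo.keys.Nodup ∧ (∀ c, memo.getD c 0 = (t.count c : Int)) ∧
    (∀ c, memo.contains c = true ↔ c ∈ t) ∧ ACnt k cnt t

-- ---- A: one insertion step ----
theorem aStep_inv {memo : PySem.Dict Char Int} {cnt k : Int} {t : List Char} (c : Char)
    (h : AInv memo cnt k t) :
    AInv (memo.insert c (memo.getD c 0 + 1))
      (if (memo.insert c (memo.getD c 0 + 1)).getD c 0 = k then cnt + 1 else cnt) k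
      (t ++ [c]) := by
  obtain ⟨hnd, hget, hmem, hc1, hc0⟩ := h
  have hcount : ((t ++ [c]).count c : Int) = (t.count c : Int) + 1 := by
    simp [List.count_append]
  have hgetc : (memo.insert c (memo.getD c 0 + 1)).getD c 0 = (t.count c : Int) + 1 := by
    rw [PySem.Dict.getD_insert]
    simp [hget c]
  refine ⟨PySem.Dict.nodup_keys_insert _ _ _ hnd, ?_, ?_, ?_, ?_⟩
  · intro x
    rw [PySem.Dict.getD_insert]
    split_ifs with hx
    · subst hx; rw [hget x, hcount]
    · rw [hget x]
      have : (t ++ [c]).count x = t.count x := by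
        simp [List.count_append, Ne.symm hx]
      rw [this]
  · intro x
    rw [PySem.Dict.contains_insert]
    simp only [Bool.or_eq_true, beq_iff_eq, List.mem_append, List.mem_singleton]
    rw [hmem x]
    tauto
  · intro hk
    rw [hgetc]
    split_ifs with htr
    · rw [kcnt_append_singleton hk, if_pos htr, hc1 hk]
    · rw [kcnt_append_singleton hk, if_neg htr, hc1 hk]; ring
  · intro hk
    rw [hgetc]
    have : ¬ ((t.count c : Int) + 1 = k) := by
      have : (0:Int) ≤ (t.count c : Int) := Int.natCast_nonneg _
      omega
    rw [if_neg this, hc0 hk]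

-- ---- A: the shrink loop ----
theorem aShrink_spec (l : List Char) (k num : Int) (fuel : Nat) {right : Nat}
    (hrn : right < l.length) :
    ∀ {memo : PySem.Dict Char Int} {cnt : Int} {left : Nat},
    right ≤ left + fuel → left ≤ right → AInv memo cnt k (win l left (right + 1)) →
    ∀ res, res = aShrink l k num fuel memo cnt left right →
    left ≤ res.2.2 ∧ res.2.2 ≤ right ∧ AInv res.1 res.2.1 k (win l res.2.2 (right + 1)) ∧
      (∀ ℓ, left ≤ ℓ → ℓ < res.2.2 → num < (dst (win l ℓ (right + 1)) : Int)) ∧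
      ((dst (win l res.2.2 (right + 1)) : Int) ≤ num ∨ res.2.2 = right) := by
  induction fuel with
  | zero =>
    intro memo cnt left hfuel hlr h res hres
    have hleft : left = right := by omega
    simp only [aShrink] at hres
    subst hres
    dsimp only
    exact ⟨le_refl _, hlr, h, fun ℓ h1 h2 => by omega, Or.inr hleft⟩
  | succ fuel ih =>
    intro memo cnt left hfuel hlr h res hres
    simp only [aShrink] at hres
    by_cases hg : left < right ∧ num < (memo.size : Int)
    · rw [if_pos hg] at hres
      obtain ⟨hnd, hget, hmem, hc1, hc0⟩ := h
      have hlen : right + 1 ≤ l.length := hrn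
      have hcons := win_cons l (show left < right + 1 by omega) hlen
      have hcmem : l.getD left ' ' ∈ win l left (right + 1) := by
        rw [hcons]; exact List.mem_cons_self
      have hcount_c : ((win l left (right + 1)).count (l.getD left ' ') : Int)
          = ((win l (left + 1) (right + 1)).count (l.getD left ' ') : Int) + 1 := by
        rw [hcons]; push_cast [List.count_cons]; simp
      have hcount_ne : ∀ x, x ≠ l.getD left ' ' →
          (win l left (right + 1)).count x = (win l (left + 1) (right + 1)).count x := by
        intro x hx
        rw [hcons, List.count_cons, if_neg (by simp [beq_iff_eq]; exact Ne.symm hx)]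
        omega
      have hm'getD : ∀ x, (memo.insert (l.getD left ' ') (memo.getD (l.getD left ' ') 0 - 1)).getD x 0
          = ((win l (left + 1) (right + 1)).count x : Int) := by
        intro x
        rw [PySem.Dict.getD_insert]
        split_ifs with hx
        · subst hx; rw [hget, hcount_c]; ring
        · rw [hget, hcount_ne x hx]
      have hm'mem : ∀ x, (memo.insert (l.getD left ' ') (memo.getD (l.getD left ' ') 0 - 1)).contains x = true
          ↔ x ∈ win l left (right + 1) := by
        intro x
        rw [PySem.Dict.contains_insert]
        simp only [Bool.or_eq_true, beq_iff_eq]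
        rw [hmem x]
        constructor
        · rintro (rfl | hx)
          · exact hcmem
          · exact hx
        · exact fun hx => Or.inr hx
      have hm'nd := PySem.Dict.nodup_keys_insert memo (l.getD left ' ')
        (memo.getD (l.getD left ' ') 0 - 1) hnd
      set cnt2 := (if memo.getD (l.getD left ' ') 0 = k then cnt - 1 else cnt) with hcnt2def
      have hcnt' : ACnt k cnt2 (win l (left + 1) (right + 1)) := by
        rw [hcnt2def]
        constructor
        · intro hk
          have hkc := kcnt_cons hk (win l (left + 1) (right + 1)) (l.getD left ' ')
          rw [← hcons] at hkc
          rw [hget, hcount_c]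
          rw [hc1 hk, hkc]
          split_ifs <;> ring
        · intro hk
          have hne : ¬ (memo.getD (l.getD left ' ') 0 = k) := by
            rw [hget, hcount_c]
            have : (0:Int) ≤ ((win l (left + 1) (right + 1)).count (l.getD left ' ') : Int) :=
              Int.natCast_nonneg _
            omega
          rw [if_neg hne]
          exact hc0 hk
      have hinv' : AInv
          (if (memo.insert (l.getD left ' ') (memo.getD (l.getD left ' ') 0 - 1)).getD (l.getD left ' ') 0 = 0
            then (memo.insert (l.getD left ' ') (memo.getD (l.getD left ' ') 0 - 1)).erase (l.getD left ' ')
            else memo.insert (l.getD left ' ') (memo.getD (l.getD left ' ') 0 - 1))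
          cnt2 k
          (win l (left + 1) (right + 1)) := by
        split_ifs with herase
        · -- the count dropped to 0: c is no longer in the window
          have hc0' : (win l (left + 1) (right + 1)).count (l.getD left ' ') = 0 := by
            have := hm'getD (l.getD left ' ')
            rw [herase] at this
            exact_mod_cast this.symm
          have hcnot : l.getD left ' ' ∉ win l (left + 1) (right + 1) :=
            List.count_eq_zero.mp hc0'
          refine ⟨dict_nodup_keys_erase _ _ hm'nd, ?_, ?_, hcnt'⟩
          · intro x
            rw [dict_getD_erase]
            split_ifs with hx
            · subst hx
              rw [hc0', Nat.cast_zero]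
            · exact hm'getD x
          · intro x
            rw [dict_contains_erase]
            rw [hm'mem x, hcons]
            simp only [List.mem_cons]
            constructor
            · rintro ⟨hxne, (rfl | hx)⟩
              · exact absurd rfl hxne
              · exact hx
            · intro hx
              refine ⟨?_, Or.inr hx⟩
              rintro rfl
              exact hcnot hx
        · -- count still positive: c stays in the window
          have hcpos : (win l (left + 1) (right + 1)).count (l.getD left ' ') ≠ 0 := by
            intro h0
            apply herase
            rw [hm'getD]
            exact_mod_cast congrArg (Nat.cast : Nat → Int) h0
          have hcin : l.getD left ' ' ∈ win l (left + 1) (right + 1) := by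
            rw [← List.count_pos_iff]; omega
          refine ⟨hm'nd, hm'getD, ?_, hcnt'⟩
          intro x
          rw [hm'mem x, hcons]
          simp only [List.mem_cons]
          constructor
          · rintro (rfl | hx)
            · exact hcin
            · exact hx
          · exact fun hx => Or.inr hx
      have := ih (show right ≤ left + 1 + fuel by omega) (show left + 1 ≤ right from hg.1)
        hinv' res (by rw [hres, hcnt2def])
      obtain ⟨ha, hb, hcI, hd, he⟩ := this
      refine ⟨by omega, hb, hcI, ?_, he⟩
      intro ℓ hl1 hl2
      rcases Nat.eq_or_lt_of_le hl1 with rfl | hl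
      · rw [← dict_size_eq_dst memo (win l left (right + 1)) hnd hmem]
        exact hg.2
      · exact hd ℓ (by omega) hl2
    · rw [if_neg hg] at hres
      subst hres
      dsimp only
      refine ⟨le_refl _, hlr, ⟨h.1, h.2.1, h.2.2.1, h.2.2.2⟩, fun ℓ h1 h2 => by omega, ?_⟩
      by_cases hltr : left < right
      · left
        have hsz : ¬ num < ((memo.size : Nat) : Int) := fun hn => hg ⟨hltr, hn⟩
        rw [← dict_size_eq_dst memo (win l left (right + 1)) h.1 h.2.2.1]
        omega
      · right; omega

-- ---- A: the result only grows ----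
theorem aLoop_ge (l : List Char) (k num : Int) (fuel : Nat) :
    ∀ (memo : PySem.Dict Char Int) (cnt maxLen : Int) (left right : Nat),
    maxLen ≤ aLoop l k num fuel memo cnt maxLen left right := by
  induction fuel with
  | zero => intro memo cnt maxLen left right; simp [aLoop]
  | succ fuel ih =>
    intro memo cnt maxLen left right
    simp only [aLoop]
    by_cases h1 : right < l.length
    · rw [if_pos h1]
      refine le_trans ?_ (ih _ _ _ _ _)
      split_ifs
      all_goals first | exact le_max_left _ _ | exact le_refl _
    · rw [if_neg h1]

-- ---- A: a fired condition means the current window is Valid ----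
theorem fire_valid (l : List Char) {k num : Int} (hk : 1 ≤ k) {m1 : PySem.Dict Char Int}
    {c1 : Int} {left right : Nat} (hlr : left ≤ right) (hrn : right + 1 ≤ l.length)
    (hinv : AInv m1 c1 k (win l left (right + 1)))
    (h1 : (m1.size : Int) = num) (h2 : c1 = num) :
    Valid l k num left (right + 1) := by
  have hsz : m1.size = dst (win l left (right + 1)) :=
    dict_size_eq_dst _ _ hinv.1 hinv.2.2.1
  have hdst : (dst (win l left (right + 1)) : Int) = num := by rw [← hsz]; exact h1
  have hkc : c1 = (kcnt k (win l left (right + 1)) : Int) := hinv.2.2.2.1 hk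
  have hkd : kcnt k (win l left (right + 1)) = dst (win l left (right + 1)) := by
    have : (kcnt k (win l left (right + 1)) : Int) = (dst (win l left (right + 1)) : Int) := by
      rw [← hkc, hdst, h2]
    exact_mod_cast this
  exact ⟨by omega, hrn, hdst, (kcnt_eq_dst_iff k _).mp hkd⟩

-- ---- A: soundness — the result is 0 (the initial maxLen) or the length of a Valid window ----
theorem aLoop_sound (l : List Char) {k : Int} (num : Int) (hk : 1 ≤ k) (fuel : Nat) :
    ∀ {memo : PySem.Dict Char Int} {cnt maxLen : Int} {left right : Nat},
    left ≤ right → right ≤ l.length → AInv memo cnt k (win l left right) →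
    (maxLen = 0 ∨ ∃ i r, Valid l k num i r ∧ maxLen = (r : Int) - i) →
    (aLoop l k num fuel memo cnt maxLen left right = 0 ∨
      ∃ i r, Valid l k num i r ∧ aLoop l k num fuel memo cnt maxLen left right = (r : Int) - i) := by
  induction fuel with
  | zero => intro memo cnt maxLen left right _ _ _ hml; simpa [aLoop] using hml
  | succ fuel ih =>
    intro memo cnt maxLen left right hlr hrn h hml
    simp only [aLoop]
    by_cases hr : right < l.length
    · rw [if_pos hr]
      have hstep := aStep_inv (l.getD right ' ') h
      rw [← win_succ l hlr hr] at hstep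
      set c := l.getD right ' ' with hc
      set m1 := memo.insert c (memo.getD c 0 + 1) with hm1
      set cnt1 := (if m1.getD c 0 = k then cnt + 1 else cnt) with hcnt1def
      have hshr := aShrink_spec l k num (right - left) hr
        (show right ≤ left + (right - left) by omega) hlr hstep _ rfl
      have hml1 : ∀ (b : Int),
          (b = if ((m1.size : Int) = num ∧ cnt1 = num) then
            max maxLen ((right : Int) - (left : Int) + 1) else maxLen) →
          (b = 0 ∨ ∃ i r, Valid l k num i r ∧ b = (r : Int) - i) := by
        intro b hb
        split_ifs at hb with hfire
        · have hval : Valid l k num left (right + 1) :=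
            fire_valid l hk hlr hr hstep hfire.1 hfire.2
          rcases hml with h0 | ⟨i0, r0, hv0, he0⟩
          · right
            refine ⟨left, right + 1, hval, ?_⟩
            rw [hb, h0]
            omega
          · rcases le_total maxLen ((right : Int) - (left : Int) + 1) with hle | hle
            · right
              refine ⟨left, right + 1, hval, ?_⟩
              rw [hb, max_eq_right hle]
              push_cast
              ring
            · right
              exact ⟨i0, r0, hv0, by rw [hb, max_eq_left hle, he0]⟩
        · exact hb ▸ hml
      exact ih (Nat.le_succ_of_le hshr.2.1) hr hshr.2.2.1 (hml1 _ rfl)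
    · rw [if_neg hr]
      exact hml

-- ---- A: for k ≤ 0 the condition never fires ----
theorem aLoop_k_nonpos (l : List Char) {k : Int} (num : Int) (hk : k ≤ 0) (fuel : Nat) :
    ∀ {memo : PySem.Dict Char Int} {cnt maxLen : Int} {left right : Nat},
    left ≤ right → right ≤ l.length → AInv memo cnt k (win l left right) →
    aLoop l k num fuel memo cnt maxLen left right = maxLen := by
  induction fuel with
  | zero => intro memo cnt maxLen left right _ _ _; simp [aLoop]
  | succ fuel ih =>
    intro memo cnt maxLen left right hlr hrn h
    simp only [aLoop]
    by_cases hr : right < l.length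
    · rw [if_pos hr]
      have hstep := aStep_inv (l.getD right ' ') h
      rw [← win_succ l hlr hr] at hstep
      have hcnt1 : (if (memo.insert (l.getD right ' ') (memo.getD (l.getD right ' ') 0 + 1)).getD
          (l.getD right ' ') 0 = k then cnt + 1 else cnt) = 0 := hstep.2.2.2.2 hk
      have hsz : (memo.insert (l.getD right ' ') (memo.getD (l.getD right ' ') 0 + 1)).size
          = dst (win l left (right + 1)) := dict_size_eq_dst _ _ hstep.1 hstep.2.2.1
      have hcmem : l.getD right ' ' ∈ win l left (right + 1) := by
        rw [win_succ l hlr hr]; simp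
      have hnofire : ¬ (((memo.insert (l.getD right ' ') (memo.getD (l.getD right ' ') 0 + 1)).size : Int) = num ∧
          (if (memo.insert (l.getD right ' ') (memo.getD (l.getD right ' ') 0 + 1)).getD
            (l.getD right ' ') 0 = k then cnt + 1 else cnt) = num) := by
        rintro ⟨h1, h2⟩
        rw [hcnt1] at h2
        have hd1 : 1 ≤ dst (win l left (right + 1)) :=
          dst_pos_of_ne_nil (fun hnil => by rw [hnil] at hcmem; exact List.not_mem_nil hcmem)
        rw [hsz] at h1
        omega
      rw [if_neg hnofire]
      have hshr := aShrink_spec l k num (right - left) hr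
        (show right ≤ left + (right - left) by omega) hlr hstep _ rfl
      exact ih (Nat.le_succ_of_le hshr.2.1) hr hshr.2.2.1
    · rw [if_neg hr]

-- ---- A: completeness — the earliest-ending longest Valid window is recorded ----
theorem aLoop_complete (l : List Char) {k num : Int} (hk : 1 ≤ k) (i j : Nat)
    (hij : Valid l k num i (j + 1)) (hjn : j < l.length)
    (hbest : ∀ i' r', Valid l k num i' r' → r' < j + 1 → (r' : Int) - i' < (j : Int) + 1 - i)
    (fuel : Nat) :
    ∀ {memo : PySem.Dict Char Int} {cnt maxLen : Int} {left right : Nat},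
    l.length ≤ right + fuel → left ≤ right →
    AInv memo cnt k (win l left right) →
    (∀ ℓ, ℓ < left → num < (dst (win l ℓ right) : Int)) →
    (dst (win l left right) : Int) ≤ num → right ≤ j →
    (j : Int) + 1 - i ≤ aLoop l k num fuel memo cnt maxLen left right := by
  have hnum1 : 1 ≤ num := by
    have hne : win l i (j + 1) ≠ [] := by
      intro hnil
      have hlen := win_length l (show j + 1 ≤ l.length by omega) (le_of_lt hij.1)
      rw [hnil] at hlen
      simp at hlen
      have hi1 := hij.1
      omega
    have := dst_pos_of_ne_nil hne
    have hd := hij.2.2.1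
    omega
  induction fuel with
  | zero =>
    intro memo cnt maxLen left right hfuel hlr h hmin hdst hrj
    omega
  | succ fuel ih =>
    intro memo cnt maxLen left right hfuel hlr h hmin hdst hrj
    have hr : right < l.length := by omega
    simp only [aLoop]
    rw [if_pos hr]
    have hstep := aStep_inv (l.getD right ' ') h
    rw [← win_succ l hlr hr] at hstep
    set c := l.getD right ' ' with hc
    set m1 := memo.insert c (memo.getD c 0 + 1) with hm1
    set cnt1 := (if m1.getD c 0 = k then cnt + 1 else cnt) with hcnt1def
    have hsz : m1.size = dst (win l left (right + 1)) :=
      dict_size_eq_dst _ _ hstep.1 hstep.2.2.1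
    have hshr := aShrink_spec l k num (right - left) hr
      (show right ≤ left + (right - left) by omega) hlr hstep _ rfl
    by_cases hrj' : right = j
    · -- the firing step
      subst hrj'
      -- left ≤ i
      have hli : left ≤ i := by
        by_contra hcon
        push Not at hcon
        have h1 := hmin i hcon
        have h2 : ∀ x ∈ win l i right, x ∈ win l i (right + 1) := by
          intro x hx
          rw [win_split l (le_of_lt (Nat.lt_of_lt_of_le hcon hlr)) (show right ≤ right + 1 by omega)]
          exact List.mem_append_left _ hx
        have h3 := dst_le_of_subset h2
        have h4 := hij.2.2.1
        omega
      have hiright : i ≤ right := by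
        have := hij.1; omega
      have hsubV : ∀ x ∈ win l i (right + 1), x ∈ win l left (right + 1) := by
        intro x hx
        rw [win_split l hli (show i ≤ right + 1 by omega)]
        exact List.mem_append_right _ hx
      have hgeq : (num : Int) ≤ (dst (win l left (right + 1)) : Int) := by
        have := dst_le_of_subset hsubV
        have h4 := hij.2.2.1
        omega
      -- dst of the pre-shrink window is at most num
      have hle : (dst (win l left (right + 1)) : Int) ≤ num := by
        by_contra hcon
        push Not at hcon
        have hWapp : win l left (right + 1) = win l left right ++ [c] := win_succ l hlr hr
        have hcnot : c ∉ win l left right := by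
          intro hcin
          rw [hWapp, dst_append_singleton, if_pos hcin] at hcon
          omega
        have hdWeq : (dst (win l left right) : Int) = num := by
          rw [hWapp, dst_append_singleton, if_neg hcnot] at hcon
          push_cast at hcon
          omega
        -- k must be 1
        have hVapp : win l i (right + 1) = win l i right ++ [c] := win_succ l hiright hr
        have hcVnot : c ∉ win l i right := by
          intro hcin
          apply hcnot
          rw [win_split l hli hiright]
          exact List.mem_append_right _ hcin
        have hcV : (win l i (right + 1)).count c = 1 := by
          rw [hVapp, List.count_append]
          rw [List.count_eq_zero.mpr hcVnot]
          simp
        have hk1 : k = 1 := by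
          have hcmem : c ∈ win l i (right + 1) := by
            rw [hVapp]; simp
          have := hij.2.2.2 c hcmem
          rw [hcV] at this
          push_cast at this
          omega
        -- the window before this step is itself Valid and ends earlier: contradiction
        have hlw : left < right := by
          by_contra hcon2
          push Not at hcon2
          have : win l left right = [] := win_eq_nil l hcon2
          rw [this] at hdWeq
          rw [dst_nil] at hdWeq
          omega
        have hvLR : Valid l k num left right := by
          refine ⟨hlw, le_of_lt hr, hdWeq, ?_⟩
          intro x hx
          have : 0 < (win l left right).count x := List.count_pos_iff.mpr hx
          omega
        -- and it is at least as long as the witness: left < i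
        have hlti : left < i := by
          have hddlt : dst (win l i (right + 1)) < dst (win l left (right + 1)) := by
            have h4 := hij.2.2.1
            omega
          have hnotsub : ¬ ∀ x ∈ win l left (right + 1), x ∈ win l i (right + 1) := by
            intro hsub
            have := dst_le_of_subset hsub
            omega
          push Not at hnotsub
          obtain ⟨d, hd1, hd2⟩ := hnotsub
          rw [win_split l hli (show i ≤ right + 1 by omega)] at hd1
          rcases List.mem_append.mp hd1 with hd3 | hd3
          · by_contra hcon2
            push Not at hcon2
            have : win l left i = [] := win_eq_nil l hcon2
            rw [this] at hd3
            exact List.not_mem_nil hd3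
          · exact absurd hd3 hd2
        have := hbest left right hvLR (by omega)
        omega
      have hdsteq : (dst (win l left (right + 1)) : Int) = num := le_antisymm hle hgeq
      -- every character of the window occurs ≥ k times in it
      have hcounts : ∀ x ∈ win l left (right + 1), k ≤ ((win l left (right + 1)).count x : Int) := by
        intro x hx
        have hsub2 : ∀ y ∈ win l left (right + 1), y ∈ win l i (right + 1) := by
          apply subset_of_dst_le hsubV
          have h4 := hij.2.2.1
          omega
        have hxV : x ∈ win l i (right + 1) := hsub2 x hx
        have h5 := hij.2.2.2 x hxV
        have h6 : (win l i (right + 1)).count x ≤ (win l left (right + 1)).count x := by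
          rw [win_split l hli (show i ≤ right + 1 by omega), List.count_append]
          omega
        have h7 : ((win l i (right + 1)).count x : Int) ≤ ((win l left (right + 1)).count x : Int) := by
          exact_mod_cast h6
        omega
      -- the condition fires
      have hfire : ((m1.size : Nat) : Int) = num ∧ cnt1 = num := by
        constructor
        · rw [hsz]; exact hdsteq
        · have hkc := hstep.2.2.2.1 hk
          have hkd : kcnt k (win l left (right + 1)) = dst (win l left (right + 1)) :=
            (kcnt_eq_dst_iff k _).mpr hcounts
          rw [hkc, hkd, hdsteq]
      rw [if_pos hfire]
      refine le_trans ?_ (aLoop_ge l k num fuel _ _ _ _ _)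
      refine le_trans ?_ (le_max_right _ _)
      have h8 : (left : Int) ≤ (i : Int) := by exact_mod_cast hli
      omega
    · -- right < j: keep going
      have hrj2 : right + 1 ≤ j := by omega
      have hmin' : ∀ ℓ, ℓ < (aShrink l k num (right - left) m1 cnt1 left right).2.2 →
          num < (dst (win l ℓ (right + 1)) : Int) := by
        intro ℓ hℓ
        by_cases hcase : ℓ < left
        · have h1 := hmin ℓ hcase
          have h2 : ∀ x ∈ win l ℓ right, x ∈ win l ℓ (right + 1) := by
            intro x hx
            rw [win_split l (show ℓ ≤ right by omega) (show right ≤ right + 1 by omega)]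
            exact List.mem_append_left _ hx
          have h3 := dst_le_of_subset h2
          omega
        · push Not at hcase
          exact hshr.2.2.2.1 ℓ hcase hℓ
      have hdst' : (dst (win l (aShrink l k num (right - left) m1 cnt1 left right).2.2 (right + 1)) : Int) ≤ num := by
        rcases hshr.2.2.2.2 with hca | hca
        · exact hca
        · rw [hca]
          have : win l right (right + 1) = win l right right ++ [c] :=
            win_succ l (le_refl right) hr
          rw [this, win_zero]
          have : dst ([] ++ [c]) = 1 := by
            rw [dst_append_singleton]
            simp [dst_nil]
          rw [this]
          omega
      exact ih (by omega) (Nat.le_succ_of_le hshr.2.1) hshr.2.2.1 hmin' hdst' hrj2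

-- ---- B: counter facts ----
theorem counter_insert_step (t : List Char) (c : Char) :
    (PySem.Dict.counter t).insert c ((PySem.Dict.counter t).getD c 0 + 1)
      = PySem.Dict.counter (t ++ [c]) := by
  rw [← PySem.Dict.foldl_insert_getD_add_one_eq_counter,
    ← PySem.Dict.foldl_insert_getD_add_one_eq_counter, List.foldl_append]
  simp

theorem counter_size (t : List Char) : ((PySem.Dict.counter t).size : Int) = (dst t : Int) := by
  have h1 : (PySem.Dict.counter t).size = (PySem.Set.ofList t).length := by
    simp [PySem.Dict.size, PySem.Dict.items_counter]
  rw [h1, setOfList_length]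

theorem counter_values_all (k : Int) (t : List Char) :
    ((PySem.Dict.counter t).values.all (fun v => k ≤ v) = true)
      ↔ (∀ x ∈ t, k ≤ (t.count x : Int)) := by
  have hv : (PySem.Dict.counter t).values = (PySem.Set.ofList t).map (fun c => (t.count c : Int)) := by
    show (PySem.Dict.counter t).items.map (·.2) = _
    rw [PySem.Dict.items_counter]
    simp
  rw [hv, List.all_map]
  simp [List.all_eq_true, PySem.Set.mem_ofList]

-- ---- B: the inner fold ----
def bRun (l : List Char) (k num : Int) (i r : Nat) (b0 : Int) : PySem.Dict Char Int × Int :=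
  (PySem.List.enumerate (win l i r) (i : Int)).foldl (bStep k num (i : Int))
    (PySem.Dict.empty, b0)

theorem bRun_succ (l : List Char) (k num : Int) (i r : Nat) (b0 : Int)
    (hir : i ≤ r) (hr : r < l.length) :
    bRun l k num i (r + 1) b0 = bStep k num (i : Int) (bRun l k num i r b0)
      ((i : Int) + ((r - i : Nat) : Int), l.getD r ' ') := by
  unfold bRun
  rw [win_succ l hir hr, PySem.List.enumerate_append, win_length l (le_of_lt hr) hir,
    List.foldl_append]
  simp [PySem.List.enumerate]

theorem bRun_spec (l : List Char) (k num : Int) (b0 : Int) {i r : Nat}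
    (hir : i ≤ r) (hrn : r ≤ l.length) :
    (bRun l k num i r b0).1 = PySem.Dict.counter (win l i r) ∧
    b0 ≤ (bRun l k num i r b0).2 ∧
    ((bRun l k num i r b0).2 = b0 ∨
      ∃ r', Valid l k num i r' ∧ r' ≤ r ∧ (bRun l k num i r b0).2 = (r' : Int) - i) ∧
    (∀ r', r' ≤ r → Valid l k num i r' → (r' : Int) - i ≤ (bRun l k num i r b0).2) := by
  induction r, hir using Nat.le_induction with
  | base =>
    unfold bRun
    rw [win_zero]
    refine ⟨rfl, le_refl _, Or.inl rfl, ?_⟩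
    intro r' hr1 hr2
    have := hr2.1
    omega
  | succ r hir ih =>
    have hrl : r < l.length := by omega
    obtain ⟨ih1, ih2, ih3, ih4⟩ := ih (le_of_lt hrl)
    rw [bRun_succ l k num i r b0 hir hrl]
    simp only [bStep]
    rw [ih1, counter_insert_step, ← win_succ l hir hrl]
    have hjlen : ((i : Int) + ((r - i : Nat) : Int)) - (i : Int) + 1 = ((r + 1 : Nat) : Int) - (i : Int) := by
      omega
    have hcond : ((((PySem.Dict.counter (win l i (r + 1))).size : Nat) : Int) = num ∧
        (PySem.Dict.counter (win l i (r + 1))).values.all (fun v => k ≤ v) = true)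
        ↔ Valid l k num i (r + 1) := by
      rw [counter_size, counter_values_all]
      constructor
      · rintro ⟨h1, h2⟩
        exact ⟨by omega, hrn, h1, h2⟩
      · rintro ⟨h1, h2, h3, h4⟩
        exact ⟨h3, h4⟩
    constructor
    · rfl
    constructor
    · -- b0 ≤ new best
      split_ifs with hf
      · exact le_trans ih2 (le_max_left _ _)
      · exact ih2
    constructor
    · -- shape of the new best
      split_ifs with hf
      · rcases le_total (bRun l k num i r b0).2 (((i : Int) + ((r - i : Nat) : Int)) - (i : Int) + 1) with hle | hle
        · right
          refine ⟨r + 1, hcond.mp hf, le_refl _, ?_⟩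
          rw [max_eq_right hle, hjlen]
        · rw [max_eq_left hle]
          rcases ih3 with h0 | ⟨r', hv, hle', he⟩
          · exact Or.inl h0
          · exact Or.inr ⟨r', hv, by omega, he⟩
      · rcases ih3 with h0 | ⟨r', hv, hle', he⟩
        · exact Or.inl h0
        · exact Or.inr ⟨r', hv, by omega, he⟩
    · -- upper bound for all valid windows ending by r+1
      intro r' hr1 hr2
      rcases Nat.lt_or_ge r' (r + 1) with hlt | hge
      · have hbound := ih4 r' (by omega) hr2
        split_ifs with hf
        · exact le_trans hbound (le_max_left _ _)
        · exact hbound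
      · have hr'eq : r' = r + 1 := by omega
        subst hr'eq
        rw [if_pos (hcond.mpr hr2), hjlen]
        exact le_max_right _ _

-- ---- B: full characterisation ----
theorem drop_eq_win (l : List Char) (i : Nat) : l.drop i = win l i l.length := by
  unfold win
  rw [List.take_of_length_le]
  rw [List.length_drop]

theorem alt_eq_rangeFold (s : String) (k num : Int) :
    getMaxKcharLen_alt s k num = (List.range s.toList.length).foldl
      (fun best i => (bRun s.toList k num i s.toList.length best).2) 0 := by
  unfold getMaxKcharLen_alt
  dsimp only
  rw [PySem.List.pyRange_zero_nat, List.foldl_map]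
  apply PySem.List.foldl_congr_mem
  intro acc x hx
  unfold bRun
  rw [PySem.List.slice_from _ (by exact_mod_cast Nat.zero_le x)]
  rw [Int.toNat_natCast, drop_eq_win]

theorem bOuter_spec (l : List Char) (k num : Int) (m : Nat) (hm : m ≤ l.length) :
    (0 ≤ (List.range m).foldl (fun best i => (bRun l k num i l.length best).2) 0) ∧
    ((List.range m).foldl (fun best i => (bRun l k num i l.length best).2) 0 = 0 ∨
      ∃ i r, Valid l k num i r ∧
        (List.range m).foldl (fun best i => (bRun l k num i l.length best).2) 0 = (r : Int) - i) ∧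
    (∀ i r, i < m → Valid l k num i r →
      (r : Int) - i ≤ (List.range m).foldl (fun best i => (bRun l k num i l.length best).2) 0) := by
  induction m with
  | zero =>
    refine ⟨le_refl _, Or.inl rfl, ?_⟩
    intro i r hi
    omega
  | succ m ih =>
    obtain ⟨ih1, ih2, ih3⟩ := ih (by omega)
    rw [List.range_succ, List.foldl_append]
    simp only [List.foldl_cons, List.foldl_nil]
    obtain ⟨_, hb2, hb3, hb4⟩ := bRun_spec l k num
      ((List.range m).foldl (fun best i => (bRun l k num i l.length best).2) 0)
      (show m ≤ l.length by omega) (le_refl l.length)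
    refine ⟨le_trans ih1 hb2, ?_, ?_⟩
    · rcases hb3 with heq | ⟨r', hv, _, he⟩
      · rw [heq]
        exact ih2
      · exact Or.inr ⟨m, r', hv, he⟩
    · intro i r hi hv
      rcases Nat.lt_or_ge i m with hlt | hge
      · exact le_trans (ih3 i r hlt hv) hb2
      · have : i = m := by omega
        subst this
        exact hb4 r hv.2.1 hv

theorem bResult_spec (s : String) (k num : Int) :
    (0 ≤ getMaxKcharLen_alt s k num) ∧
    (getMaxKcharLen_alt s k num = 0 ∨
      ∃ i r, Valid s.toList k num i r ∧ getMaxKcharLen_alt s k num = (r : Int) - i) ∧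
    (∀ i r, Valid s.toList k num i r → (r : Int) - i ≤ getMaxKcharLen_alt s k num) := by
  rw [alt_eq_rangeFold]
  obtain ⟨h1, h2, h3⟩ := bOuter_spec s.toList k num s.toList.length (le_refl _)
  refine ⟨h1, h2, ?_⟩
  intro i r hv
  exact h3 i r (by have := hv.1; have := hv.2.1; omega) hv

-- ---- existence of a window with a prescribed number of distinct characters ----
theorem exists_win_dst (l : List Char) (m : Nat) (hm : m ≤ dst l) :
    ∃ r ≤ l.length, dst (win l 0 r) = m := by
  have key : ∀ r, r ≤ l.length → ∀ m', m' ≤ dst (win l 0 r) → ∃ r' ≤ r, dst (win l 0 r') = m' := by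
    intro r
    induction r with
    | zero =>
      intro _ m' hm2
      rw [win_zero, dst_nil] at hm2
      exact ⟨0, le_refl _, by rw [win_zero, dst_nil]; omega⟩
    | succ r ih =>
      intro hr m' hm2
      have hstep : dst (win l 0 (r + 1)) ≤ dst (win l 0 r) + 1 := by
        rw [win_succ l (Nat.zero_le r) (by omega), dst_append_singleton]
        split_ifs <;> omega
      by_cases hle : m' ≤ dst (win l 0 r)
      · obtain ⟨r', h1, h2⟩ := ih (by omega) m' hle
        exact ⟨r', by omega, h2⟩
      · exact ⟨r + 1, le_refl _, by omega⟩
  have h := key l.length (le_refl _) m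
  rw [win_zero_length] at h
  exact h hm

-- ---- assembly helpers ----
theorem ainv_init (k : Int) : AInv PySem.Dict.empty 0 k [] := by
  refine ⟨?_, ?_, ?_, ?_, ?_⟩
  · simp [PySem.Dict.keys, PySem.Dict.empty]
  · intro c
    simp [PySem.Dict.getD_empty]
  · intro c
    simp [PySem.Dict.contains_empty]
  · intro _
    unfold kcnt
    simp
  · intro _
    rfl

theorem win_ne_nil {l : List Char} {i r : Nat} (hir : i < r) (hr : r ≤ l.length) :
    win l i r ≠ [] := by
  intro hnil
  have hlen := win_length l hr (le_of_lt hir)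
  rw [hnil] at hlen
  simp at hlen
  omega

theorem valid_num_range {l : List Char} {k num : Int} {i r : Nat}
    (hv : Valid l k num i r) : 1 ≤ num ∧ num ≤ (dst l : Int) := by
  have h1 := dst_pos_of_ne_nil (win_ne_nil hv.1 hv.2.1)
  have h2 : dst (win l i r) ≤ dst l := dst_le_of_subset (win_subset_l l i r)
  have h3 := hv.2.2.1
  constructor <;> omega

-- ===== VERDICT (by name: the statement is the Claim_ definition above) =====
theorem getMaxKcharLen_spec : Claim_unchanged_getMaxKcharLen := by
  intro s k num _hdom hD
  unfold getMaxKcharLen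
  have hinit : AInv PySem.Dict.empty 0 k (win s.toList 0 0) := by
    rw [win_zero]; exact ainv_init k
  obtain ⟨hB0, hBshape, hBbound⟩ := bResult_spec s k num
  by_cases hk : 1 ≤ k
  · by_cases hex : ∃ i r, Valid s.toList k num i r
    · -- some qualifying substring exists: both sides compute the maximal length
      haveI : DecidablePred (fun m => ∃ r ≤ s.toList.length, ∃ i, Valid s.toList k num i r ∧ r - i = m) :=
        Classical.decPred _
      set P : Nat → Prop := fun m => ∃ r ≤ s.toList.length, ∃ i, Valid s.toList k num i r ∧ r - i = m with hP
      obtain ⟨i1, r1, hv1⟩ := hex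
      have hP1 : P (r1 - i1) := ⟨r1, hv1.2.1, i1, hv1, rfl⟩
      have hlen1 : r1 - i1 ≤ s.toList.length := by
        have := hv1.2.1; omega
      set M := Nat.findGreatest P s.toList.length with hM
      have hPM : P M := Nat.findGreatest_spec hlen1 hP1
      have hMmax : ∀ i r, Valid s.toList k num i r → r - i ≤ M := by
        intro i r hv
        exact Nat.le_findGreatest (by have := hv.2.1; omega) ⟨r, hv.2.1, i, hv, rfl⟩
      haveI : DecidablePred (fun r => ∃ i, Valid s.toList k num i r ∧ r - i = M) :=
        Classical.decPred _
      have hQex : ∃ r, ∃ i, Valid s.toList k num i r ∧ r - i = M := by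
        obtain ⟨r, _, i, hv, he⟩ := hPM
        exact ⟨r, i, hv, he⟩
      set r0 := Nat.find hQex with hr0
      obtain ⟨i0, hv0, hlen0⟩ := Nat.find_spec hQex
      have hmin0 : ∀ r', (∃ i, Valid s.toList k num i r' ∧ r' - i = M) → r0 ≤ r' :=
        fun r' h => Nat.find_min' hQex h
      have hi0r0 : i0 < r0 := hv0.1
      have hM1 : 1 ≤ M := by omega
      -- the completeness hypotheses for the pair (i0, r0)
      have hbest : ∀ i' r', Valid s.toList k num i' r' → r' < (r0 - 1) + 1 →
          (r' : Int) - i' < ((r0 - 1 : Nat) : Int) + 1 - i0 := by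
        intro i' r' hv' hr'
        have hle' : r' - i' ≤ M := hMmax i' r' hv'
        have hne' : r' - i' ≠ M := by
          intro heq'
          have := hmin0 r' ⟨i', hv', heq'⟩
          omega
        have hii' : i' < r' := hv'.1
        have : ((r0 - 1 : Nat) : Int) + 1 - i0 = (M : Int) := by
          omega
        rw [this]
        omega
      have hvalid0 : Valid s.toList k num i0 ((r0 - 1) + 1) := by
        have : (r0 - 1) + 1 = r0 := by omega
        rw [this]
        exact hv0
      have hnum0 := (valid_num_range hv0).1
      have hA_ge : (M : Int) ≤ aLoop s.toList k num s.toList.length PySem.Dict.empty 0 0 0 0 := by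
        have hcomp := aLoop_complete s.toList hk i0 (r0 - 1) hvalid0
          (by have := hv0.2.1; omega) hbest s.toList.length
          (memo := PySem.Dict.empty) (cnt := 0) (maxLen := 0) (left := 0) (right := 0)
          (by omega) (le_refl 0) hinit
          (fun ℓ hℓ => by omega)
          (by rw [win_zero, dst_nil]; push_cast; omega)
          (by omega)
        have : ((r0 - 1 : Nat) : Int) + 1 - i0 = (M : Int) := by omega
        rw [this] at hcomp
        exact hcomp
      have hA_le : aLoop s.toList k num s.toList.length PySem.Dict.empty 0 0 0 0 ≤ (M : Int) := by
        rcases aLoop_sound s.toList num hk s.toList.length (le_refl 0) (Nat.zero_le _)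
          hinit (Or.inl rfl) with h0 | ⟨i, r, hv, he⟩
        · rw [h0]
          exact_mod_cast Nat.zero_le M
        · rw [he]
          have h1 := hMmax i r hv
          have h2 := hv.1
          omega
      have hB_ge : (M : Int) ≤ getMaxKcharLen_alt s k num := by
        have := hBbound i0 r0 hv0
        have h2 : ((r0 : Nat) : Int) - i0 = (M : Int) := by omega
        omega
      have hB_le : getMaxKcharLen_alt s k num ≤ (M : Int) := by
        rcases hBshape with h0 | ⟨i, r, hv, he⟩
        · rw [h0]
          exact_mod_cast Nat.zero_le M
        · rw [he]
          have h1 := hMmax i r hv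
          have h2 := hv.1
          omega
      omega
    · -- no qualifying substring: both sides are 0
      push Not at hex
      have hA : aLoop s.toList k num s.toList.length PySem.Dict.empty 0 0 0 0 = 0 := by
        rcases aLoop_sound s.toList num hk s.toList.length (le_refl 0) (Nat.zero_le _)
          hinit (Or.inl rfl) with h0 | ⟨i, r, hv, _⟩
        · exact h0
        · exact absurd hv (hex i r)
      have hB : getMaxKcharLen_alt s k num = 0 := by
        rcases hBshape with h0 | ⟨i, r, hv, _⟩
        · exact h0
        · exact absurd hv (hex i r)
      rw [hA, hB]
  · -- k ≤ 0: A never fires; outside D_ there is no qualifying substring either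
    have hk0 : k ≤ 0 := by omega
    have hA : aLoop s.toList k num s.toList.length PySem.Dict.empty 0 0 0 0 = 0 :=
      aLoop_k_nonpos s.toList num hk0 s.toList.length (le_refl 0) (Nat.zero_le _) hinit
    have hnoval : ∀ i r, ¬ Valid s.toList k num i r := by
      intro i r hv
      have := valid_num_range hv
      have hDfalse : D_getMaxKcharLen s k num := by
        unfold D_getMaxKcharLen
        rw [setOfList_length]
        exact ⟨hk0, this.1, this.2⟩
      exact hD hDfalse
    have hB : getMaxKcharLen_alt s k num = 0 := by
      rcases hBshape with h0 | ⟨i, r, hv, _⟩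
      · exact h0
      · exact absurd hv (hnoval i r)
    rw [hA, hB]

theorem getMaxKcharLen_changed : Claim_changed_getMaxKcharLen := by
  unfold Claim_changed_getMaxKcharLen; decide

theorem getMaxKcharLen_tight : Claim_exact_getMaxKcharLen := by
  intro s k num _hdom hD
  obtain ⟨hk0, hnum1, hnumd⟩ := hD
  rw [setOfList_length] at hnumd
  have hinit : AInv PySem.Dict.empty 0 k (win s.toList 0 0) := by
    rw [win_zero]; exact ainv_init k
  have hA : getMaxKcharLen s k num = 0 := by
    unfold getMaxKcharLen
    exact aLoop_k_nonpos s.toList num hk0 s.toList.length (le_refl 0) (Nat.zero_le _) hinit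
  obtain ⟨hB0, hBshape, hBbound⟩ := bResult_spec s k num
  obtain ⟨r, hrn, hrd⟩ := exists_win_dst s.toList num.toNat
    (by omega)
  have hrd' : (dst (win s.toList 0 r) : Int) = num := by
    rw [hrd]; omega
  have hr0 : 0 < r := by
    by_contra hcon
    push Not at hcon
    have : r = 0 := by omega
    subst this
    rw [win_zero, dst_nil] at hrd
    omega
  have hv : Valid s.toList k num 0 r := by
    refine ⟨hr0, hrn, hrd', ?_⟩
    intro c hc
    have := List.count_pos_iff.mpr hc
    omega
  have hBge := hBbound 0 r hv
  rw [hA]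
  intro heq
  rw [← heq] at hBge
  simp at hBge
  omega
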